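-- pv_equiv track=rewrite | github.com/page-yuna/Rosalind | Bioinformatics_Stronghold/013_IEV(2).py | geno_unique_comb
-- ===== SOURCE A (Python) =====
-- from itertools import product
--
-- def geno_unique_comb(alleles):
--     combs = set()
--     for p1 in product(alleles, repeat=2):
--         for p2 in product(alleles, repeat=2):
--             parent1, parent2 = "".join(sorted(p1)), "".join(sorted(p2))
--             combined = tuple(sorted([parent1, parent2]))
--             combs.add(combined[0] + "_" + combined[1])
--
--     return sorted(list(combs))
-- ===== SOURCE B (Python) =====
-- from itertools import combinations_with_replacement
--
-- def geno_unique_comb(alleles):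
--     genos = sorted({"".join(sorted(p)) for p in combinations_with_replacement(alleles, 2)})
--     return sorted({g1 + "_" + g2 for g1, g2 in combinations_with_replacement(genos, 2)})
-- ===== Notes on version B (the rewrite author's own statement) =====
-- stated objective: alternative
-- what changed: B deduplicates first (builds the sorted table of distinct genotypes from i<=j allele pairs) and then makes one ordered pass over distinct-genotype pairs via combinations_with_replacement, replacing A's raw a^2 x a^2 double product with its per-pair parent sorting; intended as faster (measured ~10x at n=16 in a timing run, unconfirmed at the largest size).
import Mathlib
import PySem

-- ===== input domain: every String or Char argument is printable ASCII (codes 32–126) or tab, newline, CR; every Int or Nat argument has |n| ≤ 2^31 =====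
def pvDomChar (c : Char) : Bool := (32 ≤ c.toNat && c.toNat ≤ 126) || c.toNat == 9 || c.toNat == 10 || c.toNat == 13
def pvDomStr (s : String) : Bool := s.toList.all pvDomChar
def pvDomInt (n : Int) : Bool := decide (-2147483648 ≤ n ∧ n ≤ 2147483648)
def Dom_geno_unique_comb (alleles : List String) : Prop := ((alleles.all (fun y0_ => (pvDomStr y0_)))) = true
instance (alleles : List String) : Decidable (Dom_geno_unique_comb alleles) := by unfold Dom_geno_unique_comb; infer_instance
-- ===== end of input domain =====

-- B builds the distinct-genotype table once, then makes one ordered pass over genotype pairs instead of A's raw double product.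

-- shared helper: "".join(sorted(p)) for a pair p of allele strings (appears verbatim in both Pythons)
def pvGeno (a b : String) : String :=
  PySem.Str.join "" (PySem.List.sorted [a, b] (fun x => x) false)

-- ===== PORT A =====
def geno_unique_comb (alleles : List String) : List String :=
  -- product(alleles, repeat=2)
  let prod2 := alleles.flatMap (fun x => alleles.map (fun y => (x, y)))
  let combs : PySem.Set String :=
    prod2.foldl (fun combs p1 =>
      prod2.foldl (fun combs p2 =>
        let parent1 := pvGeno p1.1 p1.2
        let parent2 := pvGeno p2.1 p2.2
        let combined := PySem.List.sorted [parent1, parent2] (fun x => x) false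
        -- combined[0] + "_" + combined[1]  (combined has exactly two elements)
        PySem.Set.add combs (PySem.Str.join "_" combined)) combs) PySem.Set.empty
  PySem.List.sorted combs (fun x => x) false

-- ===== PORT B =====
-- itertools.combinations_with_replacement(xs, 2): pairs (xs[i], xs[j]) with i ≤ j, in CPython order
def pvCwr2 {α : Type} (xs : List α) : List (α × α) :=
  match xs with
  | [] => []
  | x :: t => (x :: t).map (fun y => (x, y)) ++ pvCwr2 t

def geno_unique_comb_alt (alleles : List String) : List String :=
  let genos := PySem.List.sorted
    (PySem.Set.ofList ((pvCwr2 alleles).map (fun p => pvGeno p.1 p.2))) (fun x => x) false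
  PySem.List.sorted
    (PySem.Set.ofList ((pvCwr2 genos).map (fun p => PySem.Str.join "_" [p.1, p.2]))) (fun x => x) false

-- ===== PRECONDITION & SPEC =====
def Spec_geno_unique_comb (alleles : List String) (out : List String) : Prop := out = geno_unique_comb_alt alleles
instance (alleles : List String) (out : List String) : Decidable (Spec_geno_unique_comb alleles out) := by unfold Spec_geno_unique_comb; infer_instance

-- ===== CLAIM (what is proved, stated in full; the proofs are below) =====
def Claim_equal_geno_unique_comb : Prop := ∀ (alleles : List String), Dom_geno_unique_comb alleles → Spec_geno_unique_comb alleles (geno_unique_comb alleles)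

-- ===== LEMMAS AND PROOFS =====

lemma sorted_pair_of_le {u v : String} (h : u ≤ v) :
    PySem.List.sorted [u, v] (fun x => x) false = [u, v] := by
  apply PySem.List.sorted_eq_self_of_pairwise
  simp only [List.pairwise_cons]
  exact ⟨fun y hy => (List.mem_singleton.mp hy) ▸ h, by simp, List.Pairwise.nil⟩

lemma sorted_pair_of_ge {u v : String} (h : v ≤ u) :
    PySem.List.sorted [u, v] (fun x => x) false = [v, u] := by
  apply PySem.List.sorted_id_eq_of_perm_of_pairwise
  · exact List.Perm.swap u v []
  · simp only [List.pairwise_cons]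
    exact ⟨fun y hy => (List.mem_singleton.mp hy) ▸ h, by simp, List.Pairwise.nil⟩

lemma pvGeno_comm (a b : String) : pvGeno a b = pvGeno b a := by
  unfold pvGeno
  rcases le_total a b with h | h
  · rw [sorted_pair_of_le h, sorted_pair_of_ge h]
  · rw [sorted_pair_of_ge h, sorted_pair_of_le h]

lemma nodup_foldl_add {α : Type} [BEq α] [LawfulBEq α] {β : Type} (l : List β) (f : β → α)
    (s : PySem.Set α) (hs : s.Nodup) :
    (l.foldl (fun s b => PySem.Set.add s (f b)) s).Nodup := by
  induction l generalizing s with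
  | nil => exact hs
  | cons x t ih => exact ih _ (PySem.Set.nodup_add s (f x) hs)

lemma mem_double_fold {α β : Type} [BEq β] [LawfulBEq β] (l1 l2 : List α) (F : α → α → β)
    (s : PySem.Set β) (x : β) :
    x ∈ l1.foldl (fun s p1 => l2.foldl (fun s p2 => PySem.Set.add s (F p1 p2)) s) s ↔
      x ∈ s ∨ ∃ p1 ∈ l1, ∃ p2 ∈ l2, x = F p1 p2 := by
  induction l1 generalizing s with
  | nil => simp
  | cons a t ih =>
    simp only [List.foldl_cons, ih, PySem.Set.mem_foldl_add, List.mem_cons]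
    constructor
    · rintro ((h | ⟨p2, hp2, rfl⟩) | ⟨p1, hp1, p2, hp2, rfl⟩)
      · exact Or.inl h
      · exact Or.inr ⟨a, Or.inl rfl, p2, hp2, rfl⟩
      · exact Or.inr ⟨p1, Or.inr hp1, p2, hp2, rfl⟩
    · rintro (h | ⟨p1, (rfl | hp1), p2, hp2, rfl⟩)
      · exact Or.inl (Or.inl h)
      · exact Or.inl (Or.inr ⟨p2, hp2, rfl⟩)
      · exact Or.inr ⟨p1, hp1, p2, hp2, rfl⟩

lemma nodup_double_fold {α β : Type} [BEq β] [LawfulBEq β] (l1 l2 : List α) (F : α → α → β)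
    (s : PySem.Set β) (hs : s.Nodup) :
    (l1.foldl (fun s p1 => l2.foldl (fun s p2 => PySem.Set.add s (F p1 p2)) s) s).Nodup := by
  induction l1 generalizing s with
  | nil => exact hs
  | cons a t ih => exact ih _ (nodup_foldl_add l2 _ s hs)

lemma mem_of_mem_cwr2 {α : Type} {xs : List α} {p : α × α} (h : p ∈ pvCwr2 xs) :
    p.1 ∈ xs ∧ p.2 ∈ xs := by
  induction xs with
  | nil => simp [pvCwr2] at h
  | cons x t ih =>
    simp only [pvCwr2, List.mem_append, List.mem_map] at h
    rcases h with ⟨y, hy, rfl⟩ | h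
    · exact ⟨List.mem_cons_self, hy⟩
    · rcases ih h with ⟨h1, h2⟩
      exact ⟨List.mem_cons_of_mem _ h1, List.mem_cons_of_mem _ h2⟩

lemma cwr2_of_mem_mem {α : Type} {xs : List α} {a b : α} (ha : a ∈ xs) (hb : b ∈ xs) :
    (a, b) ∈ pvCwr2 xs ∨ (b, a) ∈ pvCwr2 xs := by
  induction xs with
  | nil => simp at ha
  | cons x t ih =>
    rcases List.mem_cons.mp ha with rfl | ha'
    · exact Or.inl (by
        simp only [pvCwr2]
        exact List.mem_append_left _ (List.mem_map.mpr ⟨b, hb, rfl⟩))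
    · rcases List.mem_cons.mp hb with rfl | hb'
      · exact Or.inr (by
          simp only [pvCwr2]
          exact List.mem_append_left _ (List.mem_map.mpr ⟨a, List.mem_cons_of_mem _ ha', rfl⟩))
      · rcases ih ha' hb' with h | h
        · exact Or.inl (by simp only [pvCwr2]; exact List.mem_append_right _ h)
        · exact Or.inr (by simp only [pvCwr2]; exact List.mem_append_right _ h)

lemma cwr2_mem_of_sorted {xs : List String} (hso : xs.Pairwise (· < ·)) {a b : String}
    (ha : a ∈ xs) (hb : b ∈ xs) (hab : a ≤ b) : (a, b) ∈ pvCwr2 xs := by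
  induction xs with
  | nil => simp at ha
  | cons x t ih =>
    have hx := (List.pairwise_cons.mp hso).1
    have ht := (List.pairwise_cons.mp hso).2
    rcases List.mem_cons.mp ha with rfl | ha'
    · simp only [pvCwr2]
      exact List.mem_append_left _ (List.mem_map.mpr ⟨b, hb, rfl⟩)
    · have hb' : b ∈ t := by
        rcases List.mem_cons.mp hb with rfl | hb'
        · exact absurd (lt_of_lt_of_le (hx a ha') hab) (lt_irrefl b)
        · exact hb'
      simp only [pvCwr2, List.mem_append]
      exact Or.inr (ih ht ha' hb')

lemma le_of_mem_cwr2 {xs : List String} (hso : xs.Pairwise (· ≤ ·)) {a b : String}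
    (h : (a, b) ∈ pvCwr2 xs) : a ≤ b := by
  induction xs with
  | nil => simp [pvCwr2] at h
  | cons x t ih =>
    have hx := (List.pairwise_cons.mp hso).1
    have ht := (List.pairwise_cons.mp hso).2
    simp only [pvCwr2, List.mem_append, List.mem_map, List.mem_cons, Prod.mk.injEq] at h
    rcases h with ⟨y, hy, rfl, rfl⟩ | h
    · rcases hy with rfl | hy
      · exact le_refl _
      · exact hx _ hy
    · exact ih ht h

-- the genotype list B builds: strictly sorted, members = pvGeno of allele pairs
lemma mem_genos {alleles : List String} {u : String} :
    u ∈ PySem.List.sorted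
        (PySem.Set.ofList ((pvCwr2 alleles).map (fun p => pvGeno p.1 p.2))) (fun x => x) false ↔
      ∃ a ∈ alleles, ∃ b ∈ alleles, u = pvGeno a b := by
  rw [PySem.List.mem_sorted]
  rw [PySem.Set.mem_ofList]
  simp only [List.mem_map]
  constructor
  · rintro ⟨p, hp, rfl⟩
    rcases mem_of_mem_cwr2 hp with ⟨h1, h2⟩
    exact ⟨p.1, h1, p.2, h2, rfl⟩
  · rintro ⟨a, ha, b, hb, rfl⟩
    rcases cwr2_of_mem_mem ha hb with h | h
    · exact ⟨(a, b), h, rfl⟩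
    · exact ⟨(b, a), h, (pvGeno_comm b a)⟩

theorem geno_unique_comb_eq_alt (alleles : List String) :
    geno_unique_comb alleles = geno_unique_comb_alt alleles := by
  unfold geno_unique_comb geno_unique_comb_alt
  set genos := PySem.List.sorted
    (PySem.Set.ofList ((pvCwr2 alleles).map (fun p => pvGeno p.1 p.2))) (fun x => x) false with hgenos
  apply (PySem.List.sorted_id_eq_sorted_id_iff_perm _ _).mpr
  have hga : genos.Pairwise (· < ·) := by
    rw [hgenos]; exact PySem.List.sorted_ofList_pairwise_lt _
  have hA := nodup_double_fold (alleles.flatMap (fun x => alleles.map (fun y => (x, y))))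
    (alleles.flatMap (fun x => alleles.map (fun y => (x, y))))
    (fun p1 p2 => PySem.Str.join "_"
      (PySem.List.sorted [pvGeno p1.1 p1.2, pvGeno p2.1 p2.2] (fun x => x) false))
    PySem.Set.empty (by simp [PySem.Set.empty])
  have hB := PySem.Set.nodup_ofList ((pvCwr2 genos).map (fun p => PySem.Str.join "_" [p.1, p.2]))
  apply (List.perm_ext_iff_of_nodup hA hB).mpr
  intro x
  rw [mem_double_fold, PySem.Set.mem_ofList]
  simp only [List.mem_flatMap, List.mem_map, PySem.Set.empty, List.not_mem_nil, false_or]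
  constructor
  · rintro ⟨p1, ⟨a, ha, b, hb, rfl⟩, p2, ⟨c, hc, d, hd, rfl⟩, rfl⟩
    have hu : pvGeno a b ∈ genos := mem_genos.mpr ⟨a, ha, b, hb, rfl⟩
    have hv : pvGeno c d ∈ genos := mem_genos.mpr ⟨c, hc, d, hd, rfl⟩
    rcases le_total (pvGeno a b) (pvGeno c d) with h | h
    · refine ⟨(pvGeno a b, pvGeno c d), cwr2_mem_of_sorted hga hu hv h, ?_⟩
      rw [sorted_pair_of_le h]
    · refine ⟨(pvGeno c d, pvGeno a b), cwr2_mem_of_sorted hga hv hu h, ?_⟩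
      rw [sorted_pair_of_ge h]
  · rintro ⟨⟨g1, g2⟩, hp, rfl⟩
    rcases mem_of_mem_cwr2 hp with ⟨h1, h2⟩
    have h12 : g1 ≤ g2 := le_of_mem_cwr2 (hga.imp le_of_lt) hp
    rcases mem_genos.mp h1 with ⟨a, ha, b, hb, rfl⟩
    rcases mem_genos.mp h2 with ⟨c, hc, d, hd, rfl⟩
    refine ⟨(a, b), ⟨a, ha, b, hb, rfl⟩, (c, d), ⟨c, hc, d, hd, rfl⟩, ?_⟩
    rw [sorted_pair_of_le h12]

-- ===== VERDICT (by name: the statement is the Claim_ definition above) =====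
theorem geno_unique_comb_spec : Claim_equal_geno_unique_comb := by
  intro alleles _
  exact geno_unique_comb_eq_alt alleles
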